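-- pv_equiv track=rewrite | github.com/TangiLC/isen_miskatonic | source/populate_mongo.py | normalize_correct
-- ===== SOURCE A (Python) =====
-- from typing import Dict, Iterator, List, Optional, Any
--
-- def normalize_correct(v: Optional[str]) -> Optional[List[str]]:
--     """
--     Normalisation du champ 'correct'
--     """
--     if v is None:
--         return []
--
--     txt = v.strip()
--     if not txt:
--         return []
--     txt = txt.replace(",", " ").replace("-", " ")
--     parts = [p for p in txt.split() if p]
--
--     return parts
-- ===== SOURCE B (Python) =====
-- def normalize_correct(v):
--     """Single-pass tokenizer: comma, dash and whitespace are delimiters."""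
--     if v is None:
--         return []
--     out = []
--     buf = []
--     for ch in v:
--         if ch == ',' or ch == '-' or ch.isspace():
--             if buf:
--                 out.append(''.join(buf))
--                 buf = []
--         else:
--             buf.append(ch)
--     if buf:
--         out.append(''.join(buf))
--     return out
-- ===== Notes on version B (the rewrite author's own statement) =====
-- stated objective: simpler
-- what changed: Replaced A's strip/replace/replace/split multi-pass string pipeline with a single-pass character tokenizer that flushes a buffer at comma, dash or whitespace.
import Mathlib
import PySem

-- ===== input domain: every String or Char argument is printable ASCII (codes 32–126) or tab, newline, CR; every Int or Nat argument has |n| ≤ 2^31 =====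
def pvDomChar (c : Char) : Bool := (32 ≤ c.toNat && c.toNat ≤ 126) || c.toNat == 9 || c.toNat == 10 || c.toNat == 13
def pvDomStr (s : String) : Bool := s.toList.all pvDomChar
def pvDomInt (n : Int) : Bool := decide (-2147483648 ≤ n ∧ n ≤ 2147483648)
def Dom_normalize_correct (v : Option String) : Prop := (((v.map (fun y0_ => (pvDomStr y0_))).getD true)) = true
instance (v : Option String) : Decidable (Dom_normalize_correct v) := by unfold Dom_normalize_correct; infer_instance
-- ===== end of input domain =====

-- B replaces A's strip/replace/replace/split pipeline with a single-pass manual tokenizer (simpler decomposition, one traversal).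

-- ===== PORT A =====
def normalize_correct (v : Option String) : List String :=
  match v with
  | none => []
  | some s =>
    let txt := PySem.Str.strip s
    if txt.toList.isEmpty then []                               -- 'if not txt'
    else
      let txt2 := PySem.Str.replace (PySem.Str.replace txt "," " ") "-" " "
      (PySem.Str.split₀ txt2).filter (fun p => !(p.toList.isEmpty))   -- [p for p in txt.split() if p]

-- ===== PORT B =====
-- delimiter test: ch == ',' or ch == '-' or ch.isspace()
def pvIsDelim (c : Char) : Bool := c == ',' || c == '-' || PySem.Chars.isspace c

-- the for-loop of Source B: buf/out are the two accumulators (kept reversed, reversed at the end,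
-- the standard fold transcription of Python's list.append); ''.join(buf) = String.ofList
def pvTokGo : List Char → List Char → List String → List String
  | [], buf, out =>
      if buf.isEmpty then out.reverse else (String.ofList buf.reverse :: out).reverse
  | c :: rest, buf, out =>
      if pvIsDelim c then
        if buf.isEmpty then pvTokGo rest [] out
        else pvTokGo rest [] (String.ofList buf.reverse :: out)
      else pvTokGo rest (c :: buf) out

def normalize_correct_alt (v : Option String) : List String :=
  match v with
  | none => []
  | some s => pvTokGo s.toList [] []

-- ===== PRECONDITION & SPEC =====
def Spec_normalize_correct (v : Option String) (out : List String) : Prop := out = normalize_correct_alt v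
instance (v : Option String) (out : List String) : Decidable (Spec_normalize_correct v out) := by unfold Spec_normalize_correct; infer_instance

-- ===== CLAIM (what is proved, stated in full; the proofs are below) =====
def Claim_equal_normalize_correct : Prop := ∀ (v : Option String), Dom_normalize_correct v → Spec_normalize_correct v (normalize_correct v)

-- ===== LEMMAS AND PROOFS =====

-- the substitution A's two single-character replaces perform on each character
def pvSub (c : Char) : Char := if (if c = ',' then ' ' else c) = '-' then ' ' else (if c = ',' then ' ' else c)

theorem pvIsspace_sub (c : Char) : PySem.Chars.isspace (pvSub c) = pvIsDelim c := by
  by_cases h1 : c = ','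
  · subst h1; decide
  · by_cases h2 : c = '-'
    · subst h2; decide
    · simp [pvSub, pvIsDelim, h1, h2]

theorem pvSub_of_not_delim {c : Char} (h : pvIsDelim c = false) : pvSub c = c := by
  have h1 : c ≠ ',' := by rintro rfl; exact absurd h (by decide)
  have h2 : c ≠ '-' := by rintro rfl; exact absurd h (by decide)
  simp [pvSub, h1, h2]

theorem pvSub_of_isspace {c : Char} (h : PySem.Chars.isspace c = true) : pvSub c = c := by
  have h1 : c ≠ ',' := by rintro rfl; exact absurd h (by decide)
  have h2 : c ≠ '-' := by rintro rfl; exact absurd h (by decide)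
  simp [pvSub, h1, h2]

-- single-character str.replace is a map
theorem pvReplaceGo_single (o n : Char) (l : List Char) :
    ∀ (fuel : Nat) (acc : List Char), l.length ≤ fuel →
      PySem.Chars.replace.go [o] [n] fuel l acc
        = acc.reverse ++ l.map (fun c => if c = o then n else c) := by
  induction l with
  | nil =>
      intro fuel acc _
      cases fuel <;> simp [PySem.Chars.replace.go]
  | cons c t ih =>
      intro fuel acc hf
      cases fuel with
      | zero => simp at hf
      | succ f =>
        have ht : t.length ≤ f := by simpa using hf
        by_cases h : c = o
        · subst h
          simp [PySem.Chars.replace.go, List.isPrefixOf, ih f _ ht]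
        · have hoc : (o == c) = false := beq_eq_false_iff_ne.mpr fun e => h e.symm
          simp [PySem.Chars.replace.go, List.isPrefixOf, hoc, ih f _ ht, h]

theorem pvReplace_single (o n : Char) (l : List Char) :
    PySem.Chars.replace l [o] [n] = l.map (fun c => if c = o then n else c) := by
  simp [PySem.Chars.replace, pvReplaceGo_single o n l l.length [] le_rfl]

-- split₀.go on a run of whitespace just flushes the buffer
theorem pvGo_spaces (w : List Char) (hw : ∀ c ∈ w, PySem.Chars.isspace c = true) :
    ∀ (cur : List Char) (acc : List (List Char)),
      PySem.Chars.split₀.go w cur acc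
        = if cur.isEmpty then acc.reverse else (cur.reverse :: acc).reverse := by
  induction w with
  | nil => intro cur acc; simp [PySem.Chars.split₀.go]
  | cons c t ih =>
      intro cur acc
      have hc : PySem.Chars.isspace c = true := hw c (by simp)
      have ht : ∀ c ∈ t, PySem.Chars.isspace c = true := fun d hd => hw d (by simp [hd])
      by_cases hcur : cur.isEmpty
      · simp [PySem.Chars.split₀.go, hc, hcur, ih ht]
      · simp [PySem.Chars.split₀.go, hc, hcur, ih ht]

theorem pvGo_prepend_spaces (w : List Char) (hw : ∀ c ∈ w, PySem.Chars.isspace c = true)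
    (x : List Char) (acc : List (List Char)) :
    PySem.Chars.split₀.go (w ++ x) [] acc = PySem.Chars.split₀.go x [] acc := by
  induction w with
  | nil => simp
  | cons c t ih =>
      have hc : PySem.Chars.isspace c = true := hw c (by simp)
      have ht : ∀ c ∈ t, PySem.Chars.isspace c = true := fun d hd => hw d (by simp [hd])
      simp [PySem.Chars.split₀.go, hc, ih ht]

theorem pvGo_append_spaces (x : List Char) (w : List Char)
    (hw : ∀ c ∈ w, PySem.Chars.isspace c = true) :
    ∀ (cur : List Char) (acc : List (List Char)),
      PySem.Chars.split₀.go (x ++ w) cur acc = PySem.Chars.split₀.go x cur acc := by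
  induction x with
  | nil =>
      intro cur acc
      simp [pvGo_spaces w hw, PySem.Chars.split₀.go]
  | cons c t ih =>
      intro cur acc
      by_cases hc : PySem.Chars.isspace c
      · by_cases hcur : cur.isEmpty <;> simp [PySem.Chars.split₀.go, hc, hcur, ih]
      · simp [PySem.Chars.split₀.go, hc, ih]

-- every token split₀ produces is nonempty
theorem pvGo_nonempty (x : List Char) :
    ∀ (cur : List Char) (acc : List (List Char)), (∀ t ∈ acc, t ≠ []) →
      ∀ t ∈ PySem.Chars.split₀.go x cur acc, t ≠ [] := by
  induction x with
  | nil =>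
      intro cur acc hacc t ht
      by_cases hcur : cur.isEmpty
      · simp [PySem.Chars.split₀.go, hcur] at ht; exact hacc t ht
      · simp [PySem.Chars.split₀.go, hcur] at ht
        rcases ht with h | h
        · exact hacc t h
        · subst h; simpa [List.isEmpty_iff] using hcur
  | cons c rest ih =>
      intro cur acc hacc t ht
      by_cases hc : PySem.Chars.isspace c
      · by_cases hcur : cur.isEmpty
        · simp only [PySem.Chars.split₀.go, hc, hcur, if_true] at ht
          exact ih [] acc hacc t ht
        · simp only [PySem.Chars.split₀.go, hc, hcur, if_true] at ht
          refine ih [] (cur.reverse :: acc) ?_ t ht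
          intro u hu
          rcases hu with _ | hu
          · simpa [List.isEmpty_iff] using hcur
          · exact hacc u (by assumption)
      · simp only [PySem.Chars.split₀.go, hc] at ht
        exact ih (c :: cur) acc hacc t ht

-- the core: B's loop over cs IS split₀.go over (cs.map pvSub)
theorem pvTok_eq (cs : List Char) :
    ∀ (buf : List Char) (outL : List (List Char)),
      pvTokGo cs buf (outL.map String.ofList)
        = (PySem.Chars.split₀.go (cs.map pvSub) buf outL).map String.ofList := by
  induction cs with
  | nil =>
      intro buf outL
      by_cases hb : buf.isEmpty <;> simp [pvTokGo, PySem.Chars.split₀.go, hb]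
  | cons c rest ih =>
      intro buf outL
      have hsp : PySem.Chars.isspace (pvSub c) = pvIsDelim c := pvIsspace_sub c
      by_cases hd : pvIsDelim c
      · by_cases hb : buf.isEmpty
        · simpa [pvTokGo, PySem.Chars.split₀.go, hsp, hd, hb] using ih [] outL
        · have := ih [] (buf.reverse :: outL)
          simpa [pvTokGo, PySem.Chars.split₀.go, hsp, hd, hb] using this
      · have hsub : pvSub c = c := pvSub_of_not_delim (by simpa using hd)
        have hcs : PySem.Chars.isspace c = false := by
          cases hsp' : PySem.Chars.isspace c
          · rfl
          · exact absurd (by simp [pvIsDelim, hsp']) hd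
        simpa [pvTokGo, PySem.Chars.split₀.go, hd, hsub, hcs] using ih (c :: buf) outL

-- strip decomposition: cs = pre ++ strip cs ++ suf with pre, suf all whitespace
theorem pvStrip_decomp (cs : List Char) :
    ∃ pre suf, cs = pre ++ PySem.Chars.strip cs ++ suf
      ∧ (∀ c ∈ pre, PySem.Chars.isspace c = true) ∧ (∀ c ∈ suf, PySem.Chars.isspace c = true) := by
  refine ⟨cs.takeWhile PySem.Chars.isspace,
          ((cs.dropWhile PySem.Chars.isspace).reverse.takeWhile PySem.Chars.isspace).reverse, ?_, ?_, ?_⟩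
  · have h1 : cs = cs.takeWhile PySem.Chars.isspace ++ cs.dropWhile PySem.Chars.isspace :=
      (List.takeWhile_append_dropWhile).symm
    have h2 : cs.dropWhile PySem.Chars.isspace
        = PySem.Chars.strip cs
          ++ ((cs.dropWhile PySem.Chars.isspace).reverse.takeWhile PySem.Chars.isspace).reverse := by
      apply List.reverse_injective
      simp [PySem.Chars.strip, PySem.Chars.lstrip, PySem.Chars.rstrip, List.reverse_append,
        List.takeWhile_append_dropWhile]
    rw [List.append_assoc, ← h2]; exact h1
  · intro c hc; exact List.mem_takeWhile_imp hc
  · intro c hc; exact List.mem_takeWhile_imp (by simpa using hc)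

-- B on cs equals split₀ applied to the substituted, stripped text
theorem pvTok_main (cs : List Char) :
    pvTokGo cs [] []
      = (PySem.Chars.split₀ ((PySem.Chars.strip cs).map pvSub)).map String.ofList := by
  obtain ⟨pre, suf, hdec, hpre, hsuf⟩ := pvStrip_decomp cs
  have hpre' : pre.map pvSub = pre :=
    (List.map_congr_left fun c hc => pvSub_of_isspace (hpre c hc)).trans (List.map_id pre)
  have hsuf' : suf.map pvSub = suf :=
    (List.map_congr_left fun c hc => pvSub_of_isspace (hsuf c hc)).trans (List.map_id suf)
  have hmap : cs.map pvSub
      = pre ++ ((PySem.Chars.strip cs).map pvSub ++ suf) := by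
    calc cs.map pvSub = (pre ++ PySem.Chars.strip cs ++ suf).map pvSub := by rw [← hdec]
    _ = pre ++ ((PySem.Chars.strip cs).map pvSub ++ suf) := by
        simp [List.map_append, hpre', hsuf']
  have h0 : pvTokGo cs [] []
      = (PySem.Chars.split₀.go (cs.map pvSub) [] []).map String.ofList := by
    simpa using pvTok_eq cs [] []
  rw [h0, hmap, pvGo_prepend_spaces pre hpre,
      pvGo_append_spaces ((PySem.Chars.strip cs).map pvSub) suf hsuf]
  rfl

-- ===== VERDICT (by name: the statement is the Claim_ definition above) =====
theorem normalize_correct_spec : Claim_equal_normalize_correct := by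
  intro v _
  unfold Spec_normalize_correct
  cases v with
  | none => rfl
  | some s =>
    have hB : normalize_correct_alt (some s)
        = (PySem.Chars.split₀ ((PySem.Chars.strip s.toList).map pvSub)).map String.ofList :=
      pvTok_main s.toList
    by_cases he : (PySem.Chars.strip s.toList).isEmpty
    · have he' : PySem.Chars.strip s.toList = [] := by simpa [List.isEmpty_iff] using he
      have : normalize_correct (some s) = [] := by
        simp [normalize_correct, PySem.Str.toList_strip, he']
      rw [this, hB, he']
      simp [PySem.Chars.split₀, PySem.Chars.split₀.go]
    · -- the replaced text of A
      have htxt2 : (PySem.Str.replace (PySem.Str.replace (PySem.Str.strip s) "," " ") "-" " ").toList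
          = (PySem.Chars.strip s.toList).map pvSub := by
        simp only [PySem.Str.toList_replace, PySem.Str.toList_strip]
        have h1 : ("," : String).toList = [','] := rfl
        have h2 : ("-" : String).toList = ['-'] := rfl
        have h3 : (" " : String).toList = [' '] := rfl
        rw [h1, h2, h3, pvReplace_single, pvReplace_single, List.map_map]
        rfl
      have hA : normalize_correct (some s)
          = ((PySem.Chars.split₀ ((PySem.Chars.strip s.toList).map pvSub)).map String.ofList).filter
              (fun p => !(p.toList.isEmpty)) := by
        simp only [normalize_correct, PySem.Str.toList_strip, he, if_false, Bool.false_eq_true]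
        rw [PySem.Str.split₀, htxt2]
      rw [hA, hB]
      refine List.filter_eq_self.mpr ?_
      intro p hp
      rcases List.mem_map.mp hp with ⟨t, ht, rfl⟩
      have hne : t ≠ [] :=
        pvGo_nonempty _ [] [] (by intro u hu; cases hu) t ht
      simp [String.toList_ofList, hne]
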